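-- pv_equiv track=rewrite | github.com/HyeonHo99/PS | BOJ/삼성SW역량테스트/21608.py | calculate_satisfaction
-- ===== SOURCE A (Python) =====
-- d_r = [1,0,-1,0]
--
-- d_c = [0,1,0,-1]
--
-- def calculate_satisfaction(classroom,like_dict,N):
--     ret = 0
--     for r in range(N):
--         for c in range(N):
--             num_likes = 0
--             for i in range(4):
--                 n_r = r + d_r[i]
--                 n_c = c + d_c[i]
--                 ## idx error caution
--                 if (0<= n_r <= N-1 and 0 <= n_c <= N-1) and (classroom[n_r][n_c] in like_dict[classroom[r][c]]):
--                     num_likes += 1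
--             ret = ret + 10**(num_likes-1) if num_likes > 0 else ret
--     return ret
-- ===== SOURCE B (Python) =====
-- def calculate_satisfaction(classroom, like_dict, N):
--     counts = {}
--     for r in range(N):
--         for c in range(N):
--             if c + 1 < N:
--                 if classroom[r][c + 1] in like_dict[classroom[r][c]]:
--                     counts[(r, c)] = counts.get((r, c), 0) + 1
--                 if classroom[r][c] in like_dict[classroom[r][c + 1]]:
--                     counts[(r, c + 1)] = counts.get((r, c + 1), 0) + 1
--             if r + 1 < N:
--                 if classroom[r + 1][c] in like_dict[classroom[r][c]]:
--                     counts[(r, c)] = counts.get((r, c), 0) + 1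
--                 if classroom[r][c] in like_dict[classroom[r + 1][c]]:
--                     counts[(r + 1, c)] = counts.get((r + 1, c), 0) + 1
--     total = 0
--     for r in range(N):
--         for c in range(N):
--             cnt = counts.get((r, c), 0)
--             if cnt > 0:
--                 total += 10 ** (cnt - 1)
--     return total
-- ===== Notes on version B (the rewrite author's own statement) =====
-- stated objective: alternative
-- what changed: Instead of scanning all four neighbors of every cell (each adjacency tested twice from scratch), B makes one pass over unordered adjacent pairs (right/down neighbor only), doing both directional like-checks per pair into a counts dict, then sums 10**(cnt-1) over the counts in a second pass.
import Mathlib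
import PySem

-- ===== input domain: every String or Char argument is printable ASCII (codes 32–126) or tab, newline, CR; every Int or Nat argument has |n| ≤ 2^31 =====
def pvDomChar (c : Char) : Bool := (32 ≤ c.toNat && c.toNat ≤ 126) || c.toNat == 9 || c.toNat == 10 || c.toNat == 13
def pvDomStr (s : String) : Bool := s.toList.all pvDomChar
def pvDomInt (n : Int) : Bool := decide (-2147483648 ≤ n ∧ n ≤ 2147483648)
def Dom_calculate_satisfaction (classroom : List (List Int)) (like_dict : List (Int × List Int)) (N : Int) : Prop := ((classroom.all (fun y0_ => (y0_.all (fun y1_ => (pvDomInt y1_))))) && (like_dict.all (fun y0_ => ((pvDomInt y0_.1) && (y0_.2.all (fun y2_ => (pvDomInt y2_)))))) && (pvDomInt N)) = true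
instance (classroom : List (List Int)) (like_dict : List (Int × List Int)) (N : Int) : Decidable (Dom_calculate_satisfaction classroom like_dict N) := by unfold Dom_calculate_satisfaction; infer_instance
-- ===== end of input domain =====

-- B replaces A's four-directional scan per cell by one pass over adjacent (right/down) pairs
-- updating a counts dict, then a summing pass; same cost, different decomposition ("alternative").

-- ===== PORT A =====
def d_r : List Int := [1, 0, -1, 0]

def d_c : List Int := [0, 1, 0, -1]

-- classroom[r][c] as an Option (none = IndexError, excluded by Pre_)
def pvCellA (classroom : List (List Int)) (r c : Int) : Option Int :=
  (PySem.List.pyGet? classroom r).bind (fun row => PySem.List.pyGet? row c)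

-- 'classroom[n_r][n_c] in like_dict[classroom[r][c]]' (false where Python would raise; Pre_ excludes those)
def pvLikeChkA (classroom : List (List Int)) (like_dict : List (Int × List Int)) (r c nr nc : Int) : Bool :=
  match pvCellA classroom nr nc, pvCellA classroom r c with
  | some nv, some v => decide (nv ∈ ((PySem.Dict.mk like_dict).get? v).getD [])
  | _, _ => false

def calculate_satisfaction (classroom : List (List Int)) (like_dict : List (Int × List Int)) (N : Int) : Int :=
  (PySem.List.pyRange 0 N 1).foldl (fun ret r =>
    (PySem.List.pyRange 0 N 1).foldl (fun ret c =>
      let num_likes : Int :=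
        (PySem.List.pyRange 0 4 1).foldl (fun num_likes i =>
          let n_r := r + (PySem.List.pyGet? d_r i).getD 0
          let n_c := c + (PySem.List.pyGet? d_c i).getD 0
          if (0 ≤ n_r ∧ n_r ≤ N - 1 ∧ 0 ≤ n_c ∧ n_c ≤ N - 1) ∧
             pvLikeChkA classroom like_dict r c n_r n_c = true
          then num_likes + 1 else num_likes) 0
      if num_likes > 0 then ret + 10 ^ (num_likes - 1).toNat else ret) ret) 0

-- ===== PORT B =====
-- classroom[r][c] (Pre_ guarantees in range wherever B reads)
def pvAtB (classroom : List (List Int)) (r c : Int) : Int :=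
  (((PySem.List.pyGet? classroom r).bind (fun row => PySem.List.pyGet? row c)).getD 0)

-- 'w in like_dict[v]'
def pvLikedB (like_dict : List (Int × List Int)) (v w : Int) : Bool :=
  decide (w ∈ ((PySem.Dict.mk like_dict).get? v).getD [])

def pvStepB (classroom : List (List Int)) (like_dict : List (Int × List Int)) (N : Int)
    (counts : PySem.Dict (Int × Int) Int) (r c : Int) : PySem.Dict (Int × Int) Int :=
  let counts :=
    if c + 1 < N then
      let counts :=
        if pvLikedB like_dict (pvAtB classroom r c) (pvAtB classroom r (c + 1)) then
          counts.insert (r, c) (counts.getD (r, c) 0 + 1) else counts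
      if pvLikedB like_dict (pvAtB classroom r (c + 1)) (pvAtB classroom r c) then
        counts.insert (r, c + 1) (counts.getD (r, c + 1) 0 + 1) else counts
    else counts
  if r + 1 < N then
    let counts :=
      if pvLikedB like_dict (pvAtB classroom r c) (pvAtB classroom (r + 1) c) then
        counts.insert (r, c) (counts.getD (r, c) 0 + 1) else counts
    if pvLikedB like_dict (pvAtB classroom (r + 1) c) (pvAtB classroom r c) then
      counts.insert (r + 1, c) (counts.getD (r + 1, c) 0 + 1) else counts
  else counts

def calculate_satisfaction_alt (classroom : List (List Int)) (like_dict : List (Int × List Int)) (N : Int) : Int :=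
  let counts : PySem.Dict (Int × Int) Int :=
    (PySem.List.pyRange 0 N 1).foldl (fun counts r =>
      (PySem.List.pyRange 0 N 1).foldl (fun counts c =>
        pvStepB classroom like_dict N counts r c) counts) PySem.Dict.empty
  (PySem.List.pyRange 0 N 1).foldl (fun total r =>
    (PySem.List.pyRange 0 N 1).foldl (fun total c =>
      let cnt := counts.getD (r, c) 0
      if cnt > 0 then total + 10 ^ (cnt - 1).toNat else total) total) 0

-- ===== PRECONDITION & SPEC =====
-- Pre_ excludes exactly the inputs where Python A raises: an IndexError when the grid has
-- fewer than N rows / a visited row has fewer than N columns, and a KeyError when N ≥ 2 and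
-- some visited cell's student is not a key of like_dict.
def Pre_calculate_satisfaction (classroom : List (List Int)) (like_dict : List (Int × List Int)) (N : Int) : Prop :=
  N.toNat ≤ classroom.length ∧
  (∀ row ∈ classroom.take N.toNat, N.toNat ≤ row.length) ∧
  (2 ≤ N → ∀ row ∈ classroom.take N.toNat, ∀ v ∈ row.take N.toNat, ((PySem.Dict.mk like_dict).get? v).isSome)

instance (classroom : List (List Int)) (like_dict : List (Int × List Int)) (N : Int) : Decidable (Pre_calculate_satisfaction classroom like_dict N) := by
  unfold Pre_calculate_satisfaction; infer_instance

def pvWitness_calculate_satisfaction : List (List Int) × (List (Int × List Int)) × Int :=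
  ([[1, 2], [3, 4]], [(1, [4]), (2, [3, 1]), (3, [1]), (4, [])], 2)

def Spec_calculate_satisfaction (classroom : List (List Int)) (like_dict : List (Int × List Int)) (N : Int) (out : Int) : Prop := out = calculate_satisfaction_alt classroom like_dict N
instance (classroom : List (List Int)) (like_dict : List (Int × List Int)) (N : Int) (out : Int) : Decidable (Spec_calculate_satisfaction classroom like_dict N out) := by unfold Spec_calculate_satisfaction; infer_instance

-- ===== CLAIM (what is proved, stated in full; the proofs are below) =====
def Claim_equal_calculate_satisfaction : Prop := ∀ (classroom : List (List Int)) (like_dict : List (Int × List Int)) (N : Int), Dom_calculate_satisfaction classroom like_dict N → Pre_calculate_satisfaction classroom like_dict N → Spec_calculate_satisfaction classroom like_dict N (calculate_satisfaction classroom like_dict N)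

-- ===== LEMMAS AND PROOFS =====

-- A's inner direction loop, named for manipulation (definitionally the fold inside calculate_satisfaction)
def pvNumA (classroom : List (List Int)) (like_dict : List (Int × List Int)) (N r c : Int) : Int :=
  (PySem.List.pyRange 0 4 1).foldl (fun num_likes i =>
    let n_r := r + (PySem.List.pyGet? d_r i).getD 0
    let n_c := c + (PySem.List.pyGet? d_c i).getD 0
    if (0 ≤ n_r ∧ n_r ≤ N - 1 ∧ 0 ≤ n_c ∧ n_c ≤ N - 1) ∧
       pvLikeChkA classroom like_dict r c n_r n_c = true
    then num_likes + 1 else num_likes) 0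

-- one A-direction indicator
def pvIA (classroom : List (List Int)) (like_dict : List (Int × List Int)) (N r c dr dc : Int) : Int :=
  if (0 ≤ r + dr ∧ r + dr ≤ N - 1 ∧ 0 ≤ c + dc ∧ c + dc ≤ N - 1) ∧
     pvLikeChkA classroom like_dict r c (r + dr) (c + dc) = true
  then 1 else 0

lemma pvNumA_eq (classroom : List (List Int)) (like_dict : List (Int × List Int)) (N r c : Int) :
    pvNumA classroom like_dict N r c =
      pvIA classroom like_dict N r c 1 0 + pvIA classroom like_dict N r c 0 1 +
      pvIA classroom like_dict N r c (-1) 0 + pvIA classroom like_dict N r c 0 (-1) := by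
  have h4 : PySem.List.pyRange 0 4 1 = [0, 1, 2, 3] := by decide
  have hr0 : (PySem.List.pyGet? d_r 0).getD 0 = 1 := by decide
  have hr1 : (PySem.List.pyGet? d_r 1).getD 0 = 0 := by decide
  have hr2 : (PySem.List.pyGet? d_r 2).getD 0 = -1 := by decide
  have hr3 : (PySem.List.pyGet? d_r 3).getD 0 = 0 := by decide
  have hc0 : (PySem.List.pyGet? d_c 0).getD 0 = 0 := by decide
  have hc1 : (PySem.List.pyGet? d_c 1).getD 0 = 1 := by decide
  have hc2 : (PySem.List.pyGet? d_c 2).getD 0 = 0 := by decide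
  have hc3 : (PySem.List.pyGet? d_c 3).getD 0 = -1 := by decide
  simp only [pvNumA, h4, List.foldl, hr0, hr1, hr2, hr3, hc0, hc1, hc2, hc3, pvIA]
  split_ifs <;> omega

-- B's three per-pair contribution indicators
def pvT1 (classroom : List (List Int)) (like_dict : List (Int × List Int)) (N r c : Int) : Int :=
  (if c + 1 < N ∧ pvLikedB like_dict (pvAtB classroom r c) (pvAtB classroom r (c + 1)) = true then 1 else 0) +
  (if r + 1 < N ∧ pvLikedB like_dict (pvAtB classroom r c) (pvAtB classroom (r + 1) c) = true then 1 else 0)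

def pvT2 (classroom : List (List Int)) (like_dict : List (Int × List Int)) (N r c : Int) : Int :=
  if c + 1 < N ∧ pvLikedB like_dict (pvAtB classroom r (c + 1)) (pvAtB classroom r c) = true then 1 else 0

def pvT3 (classroom : List (List Int)) (like_dict : List (Int × List Int)) (N r c : Int) : Int :=
  if r + 1 < N ∧ pvLikedB like_dict (pvAtB classroom (r + 1) c) (pvAtB classroom r c) = true then 1 else 0

def pvIncB (classroom : List (List Int)) (like_dict : List (Int × List Int)) (N r c : Int) (k : Int × Int) : Int :=
  (if k = (r, c) then pvT1 classroom like_dict N r c else 0) +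
  (if k = (r, c + 1) then pvT2 classroom like_dict N r c else 0) +
  (if k = (r + 1, c) then pvT3 classroom like_dict N r c else 0)

-- getD through one conditional counter-increment and B's step rewritten as four of them
def pvCondInc (d : PySem.Dict (Int × Int) Int) (b : Bool) (key : Int × Int) : PySem.Dict (Int × Int) Int :=
  if b = true then d.insert key (d.getD key 0 + 1) else d

lemma pvGetD_condInc (d : PySem.Dict (Int × Int) Int) (b : Bool) (key k : Int × Int) :
    (pvCondInc d b key).getD k 0 = d.getD k 0 + (if k = key ∧ b = true then 1 else 0) := by
  unfold pvCondInc
  cases b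
  · simp
  · simp only [if_pos, PySem.Dict.getD_insert]
    split_ifs <;> simp_all

lemma pvStepB_eq (classroom : List (List Int)) (like_dict : List (Int × List Int)) (N : Int)
    (counts : PySem.Dict (Int × Int) Int) (r c : Int) :
    pvStepB classroom like_dict N counts r c =
      pvCondInc (pvCondInc (pvCondInc (pvCondInc counts
        (decide (c + 1 < N) && pvLikedB like_dict (pvAtB classroom r c) (pvAtB classroom r (c + 1))) (r, c))
        (decide (c + 1 < N) && pvLikedB like_dict (pvAtB classroom r (c + 1)) (pvAtB classroom r c)) (r, c + 1))
        (decide (r + 1 < N) && pvLikedB like_dict (pvAtB classroom r c) (pvAtB classroom (r + 1) c)) (r, c))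
        (decide (r + 1 < N) && pvLikedB like_dict (pvAtB classroom (r + 1) c) (pvAtB classroom r c)) (r + 1, c) := by
  unfold pvStepB pvCondInc
  by_cases hc : c + 1 < N <;> by_cases hr : r + 1 < N <;>
    simp [hc, hr]

set_option maxHeartbeats 1000000 in
lemma pvStepB_getD (classroom : List (List Int)) (like_dict : List (Int × List Int)) (N : Int)
    (counts : PySem.Dict (Int × Int) Int) (r c : Int) (k : Int × Int) :
    (pvStepB classroom like_dict N counts r c).getD k 0 =
      counts.getD k 0 + pvIncB classroom like_dict N r c k := by
  obtain ⟨k1, k2⟩ := k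
  rw [pvStepB_eq, pvGetD_condInc, pvGetD_condInc, pvGetD_condInc, pvGetD_condInc]
  unfold pvIncB pvT1 pvT2 pvT3
  simp only [Bool.and_eq_true, decide_eq_true_eq, Prod.mk.injEq]
  by_cases hc : c + 1 < N <;> by_cases hr : r + 1 < N <;>
  by_cases h1 : pvLikedB like_dict (pvAtB classroom r c) (pvAtB classroom r (c + 1)) = true <;>
  by_cases h2 : pvLikedB like_dict (pvAtB classroom r (c + 1)) (pvAtB classroom r c) = true <;>
  by_cases h3 : pvLikedB like_dict (pvAtB classroom r c) (pvAtB classroom (r + 1) c) = true <;>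
  by_cases h4 : pvLikedB like_dict (pvAtB classroom (r + 1) c) (pvAtB classroom r c) = true <;>
  simp only [hc, hr, h1, h2, h3, h4, true_and, and_true, false_and, and_false, and_self,
    if_true, if_false, iff_true, iff_false] <;>
  split_ifs <;> first | omega | simp_all

-- getD through a fold whose step adds inc x at key k
lemma pvGetD_foldl {α : Type} (L : List α)
    (step : PySem.Dict (Int × Int) Int → α → PySem.Dict (Int × Int) Int)
    (inc : α → Int) (k : Int × Int)
    (h : ∀ d x, x ∈ L → (step d x).getD k 0 = d.getD k 0 + inc x) :
    ∀ d : PySem.Dict (Int × Int) Int,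
      (L.foldl step d).getD k 0 = d.getD k 0 + (L.map inc).sum := by
  induction L with
  | nil => intro d; simp
  | cons a l ih =>
    intro d
    simp only [List.foldl_cons, List.map_cons, List.sum_cons]
    rw [ih (fun d x hx => h d x (List.mem_cons_of_mem a hx)) (step d a),
        h d a (List.mem_cons_self)]
    ring

-- delta sum over a Nodup list
lemma pvSum_delta (l : List Int) (hl : l.Nodup) (a : Int) (f : Int → Int) :
    (l.map (fun x => if x = a then f x else 0)).sum = if a ∈ l then f a else 0 := by
  induction l with
  | nil => simp
  | cons b t ih =>
    simp only [List.map_cons, List.sum_cons, List.mem_cons]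
    rcases List.nodup_cons.mp hl with ⟨hb, ht⟩
    by_cases hba : b = a
    · subst hba
      rw [if_pos rfl, if_pos (Or.inl rfl), ih ht]
      simp [hb]
    · rw [if_neg hba, ih ht]
      have hab : ¬ a = b := fun h => hba h.symm
      simp [hab]

-- cells read by A are in range under Pre_, so A's Option-valued read is B's total read
lemma pvCellA_some (classroom : List (List Int)) (N r c : Int)
    (h1 : N.toNat ≤ classroom.length)
    (h2 : ∀ row ∈ classroom.take N.toNat, N.toNat ≤ row.length)
    (hr : 0 ≤ r) (hrN : r < N) (hc : 0 ≤ c) (hcN : c < N) :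
    pvCellA classroom r c = some (pvAtB classroom r c) := by
  have hrl : r < (classroom.length : Int) := by omega
  have hrn : r.toNat < classroom.length := by omega
  have hget : PySem.List.pyGet? classroom r = some (classroom[r.toNat]'hrn) :=
    PySem.List.pyGet?_eq_some_getElem classroom hr (by exact_mod_cast hrl)
  have hmem : classroom[r.toNat]'hrn ∈ classroom.take N.toNat := by
    have hlen : r.toNat < (classroom.take N.toNat).length := by
      simp [List.length_take]; omega
    have heq : (classroom.take N.toNat)[r.toNat]'hlen = classroom[r.toNat]'hrn :=
      List.getElem_take (xs := classroom) (j := N.toNat) (i := r.toNat) (h := hlen)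
    exact heq ▸ List.getElem_mem hlen
  have hrow := h2 _ hmem
  have hcl : c < ((classroom[r.toNat]'hrn).length : Int) := by omega
  have hget2 : PySem.List.pyGet? (classroom[r.toNat]'hrn) c =
      some ((classroom[r.toNat]'hrn)[c.toNat]'(by omega)) :=
    PySem.List.pyGet?_eq_some_getElem (classroom[r.toNat]'hrn) hc (by exact_mod_cast hcl)
  simp [pvCellA, pvAtB, hget, hget2]

lemma pvLikeChk_eq (classroom : List (List Int)) (like_dict : List (Int × List Int)) (N r c nr nc : Int)
    (h1 : N.toNat ≤ classroom.length)
    (h2 : ∀ row ∈ classroom.take N.toNat, N.toNat ≤ row.length)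
    (hr : 0 ≤ r) (hrN : r < N) (hc : 0 ≤ c) (hcN : c < N)
    (hnr : 0 ≤ nr) (hnrN : nr < N) (hnc : 0 ≤ nc) (hncN : nc < N) :
    pvLikeChkA classroom like_dict r c nr nc =
      pvLikedB like_dict (pvAtB classroom r c) (pvAtB classroom nr nc) := by
  unfold pvLikeChkA
  rw [pvCellA_some classroom N nr nc h1 h2 hnr hnrN hnc hncN,
      pvCellA_some classroom N r c h1 h2 hr hrN hc hcN]
  rfl

-- per-cell: A's four-direction count equals B's three-source contribution sum
lemma pvPerCell (classroom : List (List Int)) (like_dict : List (Int × List Int)) (N r c : Int)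
    (h1 : N.toNat ≤ classroom.length)
    (h2 : ∀ row ∈ classroom.take N.toNat, N.toNat ≤ row.length)
    (hr : 0 ≤ r) (hrN : r < N) (hc : 0 ≤ c) (hcN : c < N) :
    pvNumA classroom like_dict N r c =
      pvT1 classroom like_dict N r c +
      (if 1 ≤ c then pvT2 classroom like_dict N r (c - 1) else 0) +
      (if 1 ≤ r then pvT3 classroom like_dict N (r - 1) c else 0) := by
  rw [pvNumA_eq]
  have e10 : pvIA classroom like_dict N r c 1 0 =
      (if r + 1 < N ∧ pvLikedB like_dict (pvAtB classroom r c) (pvAtB classroom (r + 1) c) = true then 1 else 0) := by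
    unfold pvIA
    by_cases h : r + 1 < N
    · rw [show c + 0 = c from by ring,
          pvLikeChk_eq classroom like_dict N r c (r + 1) c h1 h2 hr hrN hc hcN (by omega) h hc hcN]
      split_ifs <;> simp_all <;> omega
    · split_ifs <;> simp_all <;> omega
  have e01 : pvIA classroom like_dict N r c 0 1 =
      (if c + 1 < N ∧ pvLikedB like_dict (pvAtB classroom r c) (pvAtB classroom r (c + 1)) = true then 1 else 0) := by
    unfold pvIA
    by_cases h : c + 1 < N
    · rw [show r + 0 = r from by ring,
          pvLikeChk_eq classroom like_dict N r c r (c + 1) h1 h2 hr hrN hc hcN hr hrN (by omega) h]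
      split_ifs <;> simp_all <;> omega
    · split_ifs <;> simp_all <;> omega
  have em10 : pvIA classroom like_dict N r c (-1) 0 =
      (if 1 ≤ r then pvT3 classroom like_dict N (r - 1) c else 0) := by
    unfold pvIA pvT3
    by_cases h : 1 ≤ r
    · rw [show c + 0 = c from by ring, show r + -1 = r - 1 from by ring,
          pvLikeChk_eq classroom like_dict N r c (r - 1) c h1 h2 hr hrN hc hcN (by omega) (by omega) hc hcN,
          show r - 1 + 1 = r from by ring]
      split_ifs <;> simp_all <;> omega
    · split_ifs <;> simp_all <;> omega
  have e0m1 : pvIA classroom like_dict N r c 0 (-1) =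
      (if 1 ≤ c then pvT2 classroom like_dict N r (c - 1) else 0) := by
    unfold pvIA pvT2
    by_cases h : 1 ≤ c
    · rw [show r + 0 = r from by ring, show c + -1 = c - 1 from by ring,
          pvLikeChk_eq classroom like_dict N r c r (c - 1) h1 h2 hr hrN hc hcN hr hrN (by omega) (by omega),
          show c - 1 + 1 = c from by ring]
      split_ifs <;> simp_all <;> omega
    · split_ifs <;> simp_all <;> omega
  rw [e10, e01, em10, e0m1]
  unfold pvT1
  ring

lemma pvSum_delta' (l : List Int) (hl : l.Nodup) (a : Int) (P : Prop) [Decidable P] (f : Int → Int) :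
    (l.map (fun x => if x = a ∧ P then f x else 0)).sum = if a ∈ l ∧ P then f a else 0 := by
  by_cases hP : P
  · simp only [hP, and_true]; exact pvSum_delta l hl a f
  · simp [hP]

-- the finished counts dict, read at an in-range cell
lemma pvCounts_getD (classroom : List (List Int)) (like_dict : List (Int × List Int)) (N r₀ c₀ : Int)
    (hr : 0 ≤ r₀) (hrN : r₀ < N) (hc : 0 ≤ c₀) (hcN : c₀ < N) :
    ((PySem.List.pyRange 0 N 1).foldl (fun counts r =>
        (PySem.List.pyRange 0 N 1).foldl (fun counts c =>
          pvStepB classroom like_dict N counts r c) counts) PySem.Dict.empty).getD (r₀, c₀) 0 =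
      pvT1 classroom like_dict N r₀ c₀ +
      (if 1 ≤ c₀ then pvT2 classroom like_dict N r₀ (c₀ - 1) else 0) +
      (if 1 ≤ r₀ then pvT3 classroom like_dict N (r₀ - 1) c₀ else 0) := by
  have hinner : ∀ r (d : PySem.Dict (Int × Int) Int),
      ((PySem.List.pyRange 0 N 1).foldl (fun counts c =>
        pvStepB classroom like_dict N counts r c) d).getD (r₀, c₀) 0 =
      d.getD (r₀, c₀) 0 +
        ((PySem.List.pyRange 0 N 1).map (fun c => pvIncB classroom like_dict N r c (r₀, c₀))).sum := by
    intro r d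
    exact pvGetD_foldl _ _ _ _ (fun d c _ => pvStepB_getD classroom like_dict N d r c (r₀, c₀)) d
  rw [pvGetD_foldl _ _
        (fun r => ((PySem.List.pyRange 0 N 1).map (fun c => pvIncB classroom like_dict N r c (r₀, c₀))).sum)
        (r₀, c₀) (fun d r _ => hinner r d) PySem.Dict.empty]
  have hnodup : (PySem.List.pyRange 0 N 1).Nodup := PySem.List.nodup_pyRange_one 0 N
  have hmem₀ : r₀ ∈ PySem.List.pyRange 0 N 1 := PySem.List.mem_pyRange_one.mpr ⟨hr, hrN⟩
  have hmemc₀ : c₀ ∈ PySem.List.pyRange 0 N 1 := PySem.List.mem_pyRange_one.mpr ⟨hc, hcN⟩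
  have hc1 : (c₀ - 1 ∈ PySem.List.pyRange 0 N 1) ↔ 1 ≤ c₀ := by
    rw [PySem.List.mem_pyRange_one]; omega
  have hr1 : (r₀ - 1 ∈ PySem.List.pyRange 0 N 1) ↔ 1 ≤ r₀ := by
    rw [PySem.List.mem_pyRange_one]; omega
  -- inner sum for a fixed r
  have hsum : ∀ r ∈ PySem.List.pyRange 0 N 1,
      ((PySem.List.pyRange 0 N 1).map (fun c => pvIncB classroom like_dict N r c (r₀, c₀))).sum =
      (if r = r₀ then pvT1 classroom like_dict N r₀ c₀ +
        (if 1 ≤ c₀ then pvT2 classroom like_dict N r₀ (c₀ - 1) else 0) else 0) +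
      (if r = r₀ - 1 ∧ 1 ≤ r₀ then pvT3 classroom like_dict N (r₀ - 1) c₀ else 0) := by
    intro r hrm
    rw [PySem.List.mem_pyRange_one] at hrm
    have hrw : ∀ c ∈ PySem.List.pyRange 0 N 1, pvIncB classroom like_dict N r c (r₀, c₀) =
        (if c = c₀ ∧ r = r₀ then pvT1 classroom like_dict N r c else 0) +
        ((if c = c₀ - 1 ∧ (r = r₀ ∧ 1 ≤ c₀) then pvT2 classroom like_dict N r c else 0) +
         (if c = c₀ ∧ (r = r₀ - 1 ∧ 1 ≤ r₀) then pvT3 classroom like_dict N r c else 0)) := by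
      intro c hcm
      rw [PySem.List.mem_pyRange_one] at hcm
      unfold pvIncB
      simp only [Prod.mk.injEq]
      split_ifs <;> (try rfl) <;> omega
    rw [List.map_congr_left hrw]
    rw [PySem.List.sum_map_add_int, PySem.List.sum_map_add_int,
        pvSum_delta' _ hnodup, pvSum_delta' _ hnodup, pvSum_delta' _ hnodup]
    by_cases e1 : r = r₀
    · subst e1
      rw [if_pos ⟨hmemc₀, rfl⟩, if_pos rfl,
          if_neg (fun h : r = r - 1 ∧ 1 ≤ r => by omega),
          if_neg (fun h : (c₀ ∈ PySem.List.pyRange 0 N 1) ∧ r = r - 1 ∧ 1 ≤ r => by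
            exact absurd h.2 (fun h2 => by omega))]
      by_cases e4 : 1 ≤ c₀
      · rw [if_pos ⟨hc1.mpr e4, rfl, e4⟩, if_pos e4]; ring
      · rw [if_neg (fun h => e4 h.2.2), if_neg e4]; ring
    · rw [if_neg (fun h => e1 h.2), if_neg (fun h => e1 h.2.1), if_neg e1]
      by_cases e2 : r = r₀ - 1 ∧ 1 ≤ r₀
      · obtain ⟨e2a, e2b⟩ := e2
        subst e2a
        rw [if_pos ⟨hmemc₀, rfl, e2b⟩, if_pos ⟨rfl, e2b⟩]; ring
      · rw [if_neg (fun h => e2 h.2), if_neg e2]; ring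
  rw [List.map_congr_left hsum, PySem.List.sum_map_add_int,
      pvSum_delta _ hnodup, pvSum_delta' _ hnodup]
  have hempty : (PySem.Dict.empty : PySem.Dict (Int × Int) Int).getD (r₀, c₀) 0 = 0 := by rfl
  rw [hempty, if_pos hmem₀]
  by_cases h1r : 1 ≤ r₀
  · have h2 : r₀ - 1 ∈ PySem.List.pyRange 0 N 1 := hr1.mpr h1r
    rw [if_pos (⟨h2, h1r⟩ : (r₀ - 1 ∈ PySem.List.pyRange 0 N 1) ∧ 1 ≤ r₀), if_pos h1r]
    ring
  · rw [if_neg (fun h : (r₀ - 1 ∈ PySem.List.pyRange 0 N 1) ∧ 1 ≤ r₀ => h1r h.2), if_neg h1r]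
    ring

-- the two row/column folds agree once the per-cell numbers agree
lemma pvFolds_congr (R : List Int) (f g : Int → Int → Int)
    (h : ∀ r ∈ R, ∀ c ∈ R, f r c = g r c) :
    R.foldl (fun (a : Int) r => R.foldl (fun (a' : Int) c =>
      if f r c > 0 then a' + 10 ^ (f r c - 1).toNat else a') a) 0 =
    R.foldl (fun (a : Int) r => R.foldl (fun (a' : Int) c =>
      if g r c > 0 then a' + 10 ^ (g r c - 1).toNat else a') a) 0 := by
  apply PySem.List.foldl_congr_mem
  intro a r hrmem
  apply PySem.List.foldl_congr_mem
  intro a' c hcmem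
  rw [h r hrmem c hcmem]

-- ===== VERDICT (by name: the statement is the Claim_ definition above) =====
theorem calculate_satisfaction_spec : Claim_equal_calculate_satisfaction := by
  intro classroom like_dict N _ hpre
  obtain ⟨h1, h2, _⟩ := hpre
  show calculate_satisfaction classroom like_dict N = calculate_satisfaction_alt classroom like_dict N
  have hA : calculate_satisfaction classroom like_dict N =
      (PySem.List.pyRange 0 N 1).foldl (fun a r => (PySem.List.pyRange 0 N 1).foldl (fun a' c =>
        if pvNumA classroom like_dict N r c > 0 then
          a' + 10 ^ (pvNumA classroom like_dict N r c - 1).toNat else a') a) 0 := rfl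
  have hB : calculate_satisfaction_alt classroom like_dict N =
      (PySem.List.pyRange 0 N 1).foldl (fun a r => (PySem.List.pyRange 0 N 1).foldl (fun a' c =>
        if (((PySem.List.pyRange 0 N 1).foldl (fun counts r =>
            (PySem.List.pyRange 0 N 1).foldl (fun counts c =>
              pvStepB classroom like_dict N counts r c) counts) PySem.Dict.empty).getD (r, c) 0) > 0
        then a' + 10 ^ ((((PySem.List.pyRange 0 N 1).foldl (fun counts r =>
            (PySem.List.pyRange 0 N 1).foldl (fun counts c =>
              pvStepB classroom like_dict N counts r c) counts) PySem.Dict.empty).getD (r, c) 0) - 1).toNat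
        else a') a) 0 := rfl
  rw [hA, hB]
  have key : ∀ r ∈ PySem.List.pyRange 0 N 1, ∀ c ∈ PySem.List.pyRange 0 N 1,
      pvNumA classroom like_dict N r c =
      ((PySem.List.pyRange 0 N 1).foldl (fun counts r =>
        (PySem.List.pyRange 0 N 1).foldl (fun counts c =>
          pvStepB classroom like_dict N counts r c) counts) PySem.Dict.empty).getD (r, c) 0 := by
    intro r hrm c hcm
    rw [PySem.List.mem_pyRange_one] at hrm hcm
    rw [pvCounts_getD classroom like_dict N r c hrm.1 hrm.2 hcm.1 hcm.2]
    exact pvPerCell classroom like_dict N r c h1 h2 hrm.1 hrm.2 hcm.1 hcm.2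
  exact pvFolds_congr (PySem.List.pyRange 0 N 1)
    (fun r c => pvNumA classroom like_dict N r c)
    (fun r c => ((PySem.List.pyRange 0 N 1).foldl (fun counts r =>
        (PySem.List.pyRange 0 N 1).foldl (fun counts c =>
          pvStepB classroom like_dict N counts r c) counts) PySem.Dict.empty).getD (r, c) 0)
    key
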